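-- pv_equiv track=rewrite | github.com/UCU-programming-tasks/skyscrapers_command_line_project | skyscrapers.py | check_uniqueness_in_rows
-- ===== SOURCE A (Python) =====
-- def check_uniqueness_in_rows(board: list):
--     """
--     Check buildings of unique height in each row.
--
--     Return True if buildings in all rows have unique height, False otherwise.
--
--     >>> check_uniqueness_in_rows(['***21**', '412453*', '423145*', '*543215',\
--                                     '*35214*', '*41532*', '*2*1***'])
--     True
--     >>> check_uniqueness_in_rows(['***22**', '412453*', '423145*', '*543215',\
--                                     '*35214*', '*41532*', '*2*1***'])
--     True
--     >>> check_uniqueness_in_rows(['***21**', '452453*', '423145*', '*543215',\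
--                                     '*35214*', '*41532*', '*2*1***'])
--     False
--     >>> check_uniqueness_in_rows(['***21**', '412453*', '423145*', '*553215',\
--                                     '*35214*', '*41532*', '*2*1***'])
--     False
--     """
--     for row_idx in range(1, len(board) - 1):
--         heights = set()
--
--         for cell_idx in range(1, len(board[row_idx]) - 1):
--             if board[row_idx][cell_idx] == '*':
--                 continue
--
--             if board[row_idx][cell_idx] in heights:
--                 return False
--
--             heights.add(board[row_idx][cell_idx])
--
--     return True
-- ===== SOURCE B (Python) =====
-- def check_uniqueness_in_rows(board: list):
--     def row_ok(row):
--         digits = sorted(c for c in row[1:-1] if c != '*')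
--         return all(a != b for a, b in zip(digits, digits[1:]))
--     return all(row_ok(row) for row in board[1:-1])
-- ===== Notes on version B (the rewrite author's own statement) =====
-- stated objective: alternative
-- what changed: Replaces the index loops with a seen-set and early return by slicing out each interior row, sorting its interior non-'*' characters and scanning for an adjacent equal pair, combined with all(...).
import Mathlib
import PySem

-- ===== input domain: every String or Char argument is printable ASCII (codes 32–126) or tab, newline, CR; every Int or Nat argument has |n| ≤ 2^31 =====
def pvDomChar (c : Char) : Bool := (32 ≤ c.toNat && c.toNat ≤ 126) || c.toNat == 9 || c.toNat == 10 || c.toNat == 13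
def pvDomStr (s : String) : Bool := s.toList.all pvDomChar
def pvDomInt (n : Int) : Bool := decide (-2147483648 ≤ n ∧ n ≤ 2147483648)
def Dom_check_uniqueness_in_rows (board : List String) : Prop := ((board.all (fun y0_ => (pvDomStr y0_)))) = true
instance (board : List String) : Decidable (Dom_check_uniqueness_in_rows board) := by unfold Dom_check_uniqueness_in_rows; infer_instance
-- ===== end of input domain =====

-- B replaces A's index loops with running seen-set and early return by a sort-then-adjacent-scan over each sliced interior row, combined with all(...): an alternative algorithm of similar cost.


-- ===== PORT A =====
-- inner loop: 'for cell_idx in range(1, len(board[row_idx]) - 1)' with the seen-set 'heights'; the early 'return False' propagates as false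
def pvA_inner (row : List Char) : List Int → PySem.Set Char → Bool
  | [], _ => true
  | i :: rest, heights =>
    let c := PySem.List.pyGetD row i ' '   -- board[row_idx][cell_idx]; indices from range(1, len-1) are always in range
    if c == '*' then pvA_inner row rest heights
    else if PySem.Set.contains heights c then false
    else pvA_inner row rest (PySem.Set.add heights c)

-- outer loop: 'for row_idx in range(1, len(board) - 1)'
def pvA_outer (board : List String) : List Int → Bool
  | [] => true
  | i :: rest =>
    let row := (PySem.List.pyGetD board i "").toList
    if pvA_inner row (PySem.List.pyRange 1 ((row.length : Int) - 1) 1) PySem.Set.empty then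
      pvA_outer board rest
    else false

def check_uniqueness_in_rows (board : List String) : Bool :=
  pvA_outer board (PySem.List.pyRange 1 ((board.length : Int) - 1) 1)

-- ===== PORT B =====
-- row_ok: sort the interior non-'*' characters, then require no adjacent pair equal
def pvB_row_ok (row : List Char) : Bool :=
  let digits := PySem.List.sorted ((PySem.List.slice row (some 1) (some (-1))).filter (fun c => c != '*')) (fun c => c) false
  (digits.zip (PySem.List.slice digits (some 1) none)).all (fun p => p.1 != p.2)

def check_uniqueness_in_rows_alt (board : List String) : Bool :=
  (PySem.List.slice board (some 1) (some (-1))).all (fun s => pvB_row_ok s.toList)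

-- ===== PRECONDITION & SPEC =====
def Spec_check_uniqueness_in_rows (board : List String) (out : Bool) : Prop := out = check_uniqueness_in_rows_alt board
instance (board : List String) (out : Bool) : Decidable (Spec_check_uniqueness_in_rows board out) := by unfold Spec_check_uniqueness_in_rows; infer_instance

-- ===== CLAIM (what is proved, stated in full; the proofs are below) =====
def Claim_equal_check_uniqueness_in_rows : Prop := ∀ (board : List String), Dom_check_uniqueness_in_rows board → Spec_check_uniqueness_in_rows board (check_uniqueness_in_rows board)

-- ===== LEMMAS AND PROOFS =====

-- xs[1:-1] is tail-and-dropLast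
theorem pvSlice1neg1 {α : Type} (xs : List α) :
    PySem.List.slice xs (some 1) (some (-1)) = xs.tail.dropLast := by
  simp [PySem.List.slice, PySem.List.clampIdx]
  cases xs with
  | nil => simp
  | cons x t => simp [List.dropLast_eq_take]

-- the index range 1..len-1 fetches exactly the interior slice xs[1:-1]
theorem pvInterior_map {α : Type} (xs : List α) (d : α) :
    (PySem.List.pyRange 1 ((xs.length : Int) - 1) 1).map (fun i => PySem.List.pyGetD xs i d)
      = PySem.List.slice xs (some 1) (some (-1)) := by
  rw [pvSlice1neg1]
  cases xs with
  | nil => rfl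
  | cons x t =>
    have hlen : ((x :: t).length : Int) - 1 = ((x :: t).dropLast.length : Int) := by simp
    rw [hlen, List.map_congr_left (g := fun i => PySem.List.pyGetD (x :: t).dropLast i d)]
    · rw [PySem.List.map_pyGetD_pyRange' (a := 1) (ha := by omega)]
      simp [List.tail_dropLast]
    · intro i hi
      rw [PySem.List.mem_pyRange_one] at hi
      rw [PySem.List.pyGetD_of_nonneg (h := by omega), PySem.List.pyGetD_of_nonneg (h := by omega)]
      rcases hi with ⟨h1, h2⟩
      simp at h2
      rw [List.getD_eq_getElem?_getD, List.getD_eq_getElem?_getD, List.getElem?_dropLast,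
        if_pos (show i.toNat < (x :: t).length - 1 by simp; omega)]

-- A's inner loop over the cells themselves (indices replaced by the characters they fetch)
def pvCells : List Char → PySem.Set Char → Bool
  | [], _ => true
  | c :: rest, h =>
    if c == '*' then pvCells rest h
    else if PySem.Set.contains h c then false
    else pvCells rest (PySem.Set.add h c)

theorem pvA_inner_eq_cells (row : List Char) (idxs : List Int) (h : PySem.Set Char) :
    pvA_inner row idxs h = pvCells (idxs.map (fun i => PySem.List.pyGetD row i ' ')) h := by
  induction idxs generalizing h with
  | nil => rfl
  | cons i rest ih => simp only [pvA_inner, pvCells, List.map]; split_ifs <;> simp [ih]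

-- the seen-set loop decides Nodup of the non-'*' cells (given the set seen so far)
theorem pvCells_iff (cs : List Char) (h : PySem.Set Char) :
    pvCells cs h = true ↔
      ((cs.filter (fun c => c != '*')).Nodup ∧ ∀ c ∈ cs.filter (fun c => c != '*'), c ∉ h) := by
  induction cs generalizing h with
  | nil => simp [pvCells]
  | cons c rest ih =>
    by_cases hstar : c = '*'
    · simp [pvCells, hstar, ih]
    · by_cases hc : c ∈ h
      · simp only [pvCells, List.filter_cons] at *
        simp [hstar, hc]
      · simp only [pvCells, List.filter_cons] at *
        simp [hstar, hc, ih]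
        constructor
        · rintro ⟨hnd, hall⟩
          exact ⟨⟨fun hcr => (hall c hcr hstar).2 rfl, hnd⟩, fun a ha hna => (hall a ha hna).1⟩
        · rintro ⟨⟨hcr, hnd⟩, hall⟩
          exact ⟨hnd, fun x hx hnx => ⟨hall x hx hnx, fun hxc => hcr (hxc ▸ hx)⟩⟩

-- adjacent-distinct on a ≤-sorted list decides Nodup
theorem pvAdj_nodup (l : List Char) (hs : l.Pairwise (· ≤ ·)) :
    (((l.zip l.tail).all (fun p => p.1 != p.2)) = true ↔ l.Nodup) := by
  induction l with
  | nil => simp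
  | cons a t ih =>
    cases t with
    | nil => simp
    | cons b t' =>
      rcases List.pairwise_cons.1 hs with ⟨hale, hs'⟩
      rcases List.pairwise_cons.1 hs' with ⟨hble, _⟩
      have ih' := ih hs'
      rw [List.tail_cons] at ih'
      simp only [List.tail_cons, List.zip_cons_cons, List.all_cons, List.nodup_cons,
        Bool.and_eq_true, bne_iff_ne, ne_eq, ih']
      constructor
      · rintro ⟨hab, hrest⟩
        refine ⟨fun hmem => ?_, hrest⟩
        rcases List.mem_cons.1 hmem with heq | hat
        · exact hab heq
        · exact hab (le_antisymm (hale b (List.mem_cons_self ..)) (hble a hat))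
      · rintro ⟨hnm, hrest⟩
        exact ⟨fun hab => hnm (hab ▸ List.mem_cons_self ..), hrest⟩

-- per-row: A's seen-set scan agrees with B's sort-and-adjacent-scan
theorem pvRow_eq (row : List Char) :
    pvA_inner row (PySem.List.pyRange 1 ((row.length : Int) - 1) 1) PySem.Set.empty = pvB_row_ok row := by
  rw [pvA_inner_eq_cells, pvInterior_map]
  simp only [pvB_row_ok]
  rw [PySem.List.slice_from_one]
  rw [Bool.eq_iff_iff, pvCells_iff,
    pvAdj_nodup _ (PySem.List.sorted_pairwise _ _)]
  rw [(PySem.List.sorted_perm _ _ _).nodup_iff]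
  simp [PySem.Set.empty]

theorem pvOuter_all (board : List String) (idxs : List Int) :
    pvA_outer board idxs
      = (idxs.map (fun i => PySem.List.pyGetD board i "")).all
          (fun s => pvA_inner s.toList (PySem.List.pyRange 1 ((s.toList.length : Int) - 1) 1) PySem.Set.empty) := by
  induction idxs with
  | nil => rfl
  | cons i rest ih =>
    simp only [pvA_outer, List.map, List.all_cons, ← ih]
    cases pvA_inner (PySem.List.pyGetD board i "").toList
        (PySem.List.pyRange 1 (((PySem.List.pyGetD board i "").toList.length : Int) - 1) 1) PySem.Set.empty
      <;> simp

-- ===== VERDICT (by name: the statement is the Claim_ definition above) =====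
theorem check_uniqueness_in_rows_spec : Claim_equal_check_uniqueness_in_rows := by
  intro board _
  unfold Spec_check_uniqueness_in_rows check_uniqueness_in_rows check_uniqueness_in_rows_alt
  rw [pvOuter_all, pvInterior_map board ""]
  congr 1
  funext s
  exact pvRow_eq s.toList
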